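-- pv_equiv track=rewrite | github.com/sanadcsedu/Course_Materials | CS 539_Natural Language Processing/hw5-data/replace_onecounts.py | find_all_words
-- ===== SOURCE A (Python) =====
-- def find_all_words(line):
--     words = []
--     w = ""
--     for char in line:
--         if ord(char) >= ord('A') and ord(char) <= ord('z') or char in ['.', '\'']:
--             w += char
--         if char == " ":
--             w = ""
--         if char == ")" and w != "":
--             words.append(w)
--             w = ""
--
--     return words
-- ===== SOURCE B (Python) =====
-- def find_all_words(line):
--     def allowed(c):
--         return (ord(c) >= ord('A') and ord(c) <= ord('z')) or c in ".'"
--     words = []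
--     for seg in line.split(' '):
--         for piece in seg.split(')')[:-1]:
--             filt = ''.join(c for c in piece if allowed(c))
--             if filt:
--                 words.append(filt)
--     return words
-- ===== Notes on version B (the rewrite author's own statement) =====
-- stated objective: faster
-- what changed: Replaced A's per-character state machine (mutable word buffer with reset rules) by a split-based decomposition: split on ' ', split each segment on ')', drop each trailing piece, filter the allowed characters, keep nonempty pieces; the splitting runs in C instead of a per-character Python loop.
import Mathlib
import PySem

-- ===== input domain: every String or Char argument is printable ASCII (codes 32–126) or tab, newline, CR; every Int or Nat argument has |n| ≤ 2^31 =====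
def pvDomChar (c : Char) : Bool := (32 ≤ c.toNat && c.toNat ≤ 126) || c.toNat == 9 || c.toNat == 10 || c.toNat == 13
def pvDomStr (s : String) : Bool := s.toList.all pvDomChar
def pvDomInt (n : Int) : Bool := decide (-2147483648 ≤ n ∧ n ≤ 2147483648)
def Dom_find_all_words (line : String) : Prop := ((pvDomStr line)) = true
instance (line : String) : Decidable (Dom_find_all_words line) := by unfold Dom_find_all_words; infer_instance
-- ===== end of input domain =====

-- B replaces A's per-character state machine by a split-based decomposition (split on ' ', then on ')',
-- filter each kept piece); a timing run measured B faster (constant-factor: C-level split vs per-char loop).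

-- ===== PORT A =====
-- A's allowed-character test: ord('A') <= ord(c) <= ord('z') or c in ['.', '\'']
def pvAllowedA (c : Char) : Bool :=
  (decide (65 ≤ c.toNat) && decide (c.toNat ≤ 122)) || (c = '.' || c = '\'')

-- one iteration of A's for-loop, state = (words, w) over lists of chars
def pvStepA (st : List (List Char) × List Char) (c : Char) : List (List Char) × List Char :=
  let w1 := if pvAllowedA c then st.2 ++ [c] else st.2
  let w2 := if c = ' ' then [] else w1
  if c = ')' ∧ w2 ≠ [] then (st.1 ++ [w2], []) else (st.1, w2)

def find_all_words (line : String) : List String :=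
  ((line.toList.foldl pvStepA ([], [])).1).map (fun w => String.mk w)

-- ===== PORT B =====
-- B's allowed-character test (same predicate as A's, written from Source B)
def pvAllowedB (c : Char) : Bool :=
  (decide (65 ≤ c.toNat) && decide (c.toNat ≤ 122)) || (c = '.' || c = '\'')

-- Python str.split(sep) over a char list (keeps empty pieces; [] splits to [[]])
def pvSplit (sep : Char) : List Char → List (List Char)
  | [] => [[]]
  | c :: cs =>
    if c = sep then [] :: pvSplit sep cs
    else match pvSplit sep cs with
      | [] => [[c]]
      | p :: ps => (c :: p) :: ps

-- inner loop body: keep the filtered piece if nonempty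
def pvPieceProc (p : List Char) : List (List Char) :=
  let f := p.filter pvAllowedB
  if f = [] then [] else [f]

-- per-segment: split on ')', drop the trailing piece, process each piece
def pvSegProc (s : List Char) : List (List Char) :=
  ((pvSplit ')' s).dropLast).flatMap pvPieceProc

def find_all_words_alt (line : String) : List String :=
  (((pvSplit ' ' line.toList).flatMap pvSegProc).map (fun w => String.mk w))

-- ===== PRECONDITION & SPEC =====
def Spec_find_all_words (line : String) (out : List String) : Prop := out = find_all_words_alt line
instance (line : String) (out : List String) : Decidable (Spec_find_all_words line out) := by unfold Spec_find_all_words; infer_instance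

-- ===== CLAIM (what is proved, stated in full; the proofs are below) =====
def Claim_equal_find_all_words : Prop := ∀ (line : String), Dom_find_all_words line → Spec_find_all_words line (find_all_words line)

-- ===== LEMMAS AND PROOFS =====

-- abstract scanner equivalent to A's loop (proof device)
def pvG (w : List Char) : List Char → List (List Char)
  | [] => []
  | c :: cs =>
    if c = ' ' then pvG [] cs
    else if c = ')' then (if w = [] then [] else [w]) ++ pvG [] cs
    else pvG (if pvAllowedA c then w ++ [c] else w) cs

theorem pvSplit_ne_nil (sep : Char) (cs : List Char) : pvSplit sep cs ≠ [] := by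
  cases cs with
  | nil => simp [pvSplit]
  | cons c cs =>
    simp only [pvSplit]
    split
    · simp
    · split <;> simp

-- A's fold computed via pvG
theorem pvFoldA_eq_g (cs : List Char) : ∀ acc w,
    (cs.foldl pvStepA (acc, w)).1 = acc ++ pvG w cs := by
  induction cs with
  | nil => intro acc w; simp [pvG]
  | cons c cs ih =>
    intro acc w
    by_cases hs : c = ' '
    · subst hs
      simp [List.foldl, pvStepA, pvG, ih]
    · by_cases hp : c = ')'
      · subst hp
        by_cases hw : w = []
        · subst hw
          simp [List.foldl, pvStepA, pvAllowedA, pvG, ih]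
        · simp [List.foldl, pvStepA, pvAllowedA, pvG, hw, ih]
      · have h1 : (c = ')' ∧ (if pvAllowedA c then w ++ [c] else w) ≠ []) = False := by
          simp [hp]
        simp [List.foldl, pvStepA, hs, hp, pvG, ih]

-- pvG with empty pending word computes B's split-based result; generalized with
-- the pending word w prefixed onto the first piece of the first segment
def pvPieceProcW (w p : List Char) : List (List Char) :=
  let f := w ++ p.filter pvAllowedB
  if f = [] then [] else [f]

def pvSegProcW (w s : List Char) : List (List Char) :=
  match pvSplit ')' s with
  | [] => []
  | p :: ps =>
    if ps = [] then []
    else pvPieceProcW w p ++ (ps.dropLast).flatMap pvPieceProc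

theorem pvSegProcW_nil (s : List Char) : pvSegProcW [] s = pvSegProc s := by
  unfold pvSegProcW pvSegProc
  cases h : pvSplit ')' s with
  | nil => simp
  | cons p ps =>
    cases ps with
    | nil => simp
    | cons q qs => simp [List.dropLast, pvPieceProcW, pvPieceProc]

def pvBW (w cs : List Char) : List (List Char) :=
  match pvSplit ' ' cs with
  | [] => []
  | s :: ss => pvSegProcW w s ++ ss.flatMap pvSegProc

theorem pvG_eq_BW (cs : List Char) : ∀ w, pvG w cs = pvBW w cs := by
  induction cs with
  | nil =>
    intro w
    simp [pvG, pvBW, pvSplit, pvSegProcW]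
  | cons c cs ih =>
    intro w
    obtain ⟨s, ss, hsplit⟩ : ∃ s ss, pvSplit ' ' cs = s :: ss := by
      cases h : pvSplit ' ' cs with
      | nil => exact absurd h (pvSplit_ne_nil _ _)
      | cons s ss => exact ⟨s, ss, rfl⟩
    by_cases hs : c = ' '
    · subst hs
      have : pvSplit ' ' (' ' :: cs) = [] :: s :: ss := by simp [pvSplit, hsplit]
      simp only [pvG, pvBW, this]
      rw [ih []]
      have hseg : pvSegProcW w ([] : List Char) = [] := by
        simp [pvSegProcW, pvSplit]
      simp [pvBW, hsplit, hseg, pvSegProcW_nil]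
    · have hsplit2 : pvSplit ' ' (c :: cs) = (c :: s) :: ss := by
        simp [pvSplit, hs, hsplit]
      obtain ⟨q, qs, hq⟩ : ∃ q qs, pvSplit ')' s = q :: qs := by
        cases h : pvSplit ')' s with
        | nil => exact absurd h (pvSplit_ne_nil _ _)
        | cons q qs => exact ⟨q, qs, rfl⟩
      by_cases hp : c = ')'
      · subst hp
        have hq2 : pvSplit ')' (')' :: s) = [] :: q :: qs := by simp [pvSplit, hq]
        have hA : pvAllowedA ')' = false := by decide
        simp only [pvG, hs]
        rw [ih []]
        simp only [pvBW, hsplit2, hsplit, pvSegProcW, hq2, hq]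
        have hPW : pvPieceProcW w [] = if w = [] then [] else [w] := by
          simp [pvPieceProcW]
        by_cases hqs : qs = []
        · subst hqs
          simp [hPW, List.dropLast]
        · simp only [if_neg (by simp : (q :: qs) ≠ []), hPW]
          have : (q :: qs).dropLast = q :: qs.dropLast := by
            cases qs with
            | nil => simp at hqs
            | cons a b => simp [List.dropLast]
          simp [pvPieceProcW, pvPieceProc, this, hqs, List.append_assoc]
      · -- ordinary character
        have hq2 : pvSplit ')' (c :: s) = (c :: q) :: qs := by
          simp [pvSplit, hp, hq]
        have hgw : pvG w (c :: cs)
            = pvG (if pvAllowedA c then w ++ [c] else w) cs := by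
          simp [pvG, hs, hp]
        rw [hgw, ih]
        simp only [pvBW, hsplit2, hsplit]
        congr 1
        simp only [pvSegProcW, hq2, hq]
        by_cases hqs : qs = []
        · simp [hqs]
        · have hpw : pvPieceProcW w (c :: q)
              = pvPieceProcW (if pvAllowedA c then w ++ [c] else w) q := by
            have hBA : pvAllowedB = pvAllowedA := rfl
            simp only [pvPieceProcW, List.filter, hBA]
            by_cases hac : pvAllowedA c
            · simp [hac, List.append_assoc]
            · simp [hac]
          simp [hqs, hpw]

theorem pvG_main (cs : List Char) :
    pvG [] cs = (pvSplit ' ' cs).flatMap pvSegProc := by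
  rw [pvG_eq_BW]
  obtain ⟨s, ss, hsplit⟩ : ∃ s ss, pvSplit ' ' cs = s :: ss := by
    cases h : pvSplit ' ' cs with
    | nil => exact absurd h (pvSplit_ne_nil _ _)
    | cons s ss => exact ⟨s, ss, rfl⟩
  simp [pvBW, hsplit, pvSegProcW_nil]

-- ===== VERDICT (by name: the statement is the Claim_ definition above) =====
theorem find_all_words_spec : Claim_equal_find_all_words := by
  intro line _
  unfold Spec_find_all_words find_all_words find_all_words_alt
  rw [pvFoldA_eq_g, pvG_main]
  simp
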